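-- pv_equiv track=rewrite | github.com/yanyatong/ML-Final-Project | data_preparation_final.py | isHoliday
-- ===== SOURCE A (Python) =====
-- holidays = ['1/1','1/28','2/14','5/30','7/4','9/5','10/10','11/11','11/24','12/25']
--
-- def isHoliday(strs):
--     res = list()
--     for str in strs:
--         curr = 0
--         for holiday in holidays:
--             if holiday in str :
--                 curr = 1
--                 break
--         res.append(curr)
--     return res
-- ===== SOURCE B (Python) =====
-- holidays = ['1/1','1/28','2/14','5/30','7/4','9/5','10/10','11/11','11/24','12/25']
-- _H = frozenset(holidays)
--
-- def _hasHoliday(s):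
--     # every holiday contains '/': anchor on each '/' and test the three
--     # holiday shapes d/d, d/dd, dd/dd as fixed windows against the set
--     for i, c in enumerate(s):
--         if c == '/':
--             for l, r in ((i - 1, i + 2), (i - 1, i + 3), (i - 2, i + 3)):
--                 if l >= 0 and s[l:r] in _H:
--                     return True
--     return False
--
-- def isHoliday(strs):
--     return [1 if _hasHoliday(s) else 0 for s in strs]
-- ===== Notes on version B (the rewrite author's own statement) =====
-- stated objective: alternative
-- what changed: A searches each of the 10 holiday substrings in each string (pattern-major `in` checks); B anchors on occurrences of '/' (which every holiday contains) and tests only the three holiday shapes d/d, d/dd, dd/dd as fixed-width windows against a precomputed frozenset, so the pattern list is never scanned per string.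
import Mathlib
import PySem

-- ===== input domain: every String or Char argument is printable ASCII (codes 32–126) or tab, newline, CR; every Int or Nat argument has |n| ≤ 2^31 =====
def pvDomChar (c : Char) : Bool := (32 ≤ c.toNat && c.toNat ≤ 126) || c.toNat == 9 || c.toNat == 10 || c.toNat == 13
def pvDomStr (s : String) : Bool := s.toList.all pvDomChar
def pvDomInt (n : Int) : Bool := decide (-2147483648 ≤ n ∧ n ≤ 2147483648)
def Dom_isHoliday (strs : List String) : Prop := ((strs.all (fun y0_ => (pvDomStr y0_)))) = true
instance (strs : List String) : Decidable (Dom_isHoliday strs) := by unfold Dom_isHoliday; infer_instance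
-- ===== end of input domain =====

-- B replaces A's pattern-major substring search (each holiday tested with `in`) by
-- anchored matching: every holiday contains '/', so B scans for '/' and checks the three
-- holiday shapes d/d, d/dd, dd/dd as fixed windows against a set — objective: alternative.

-- module-level 'holidays' constant, shared by both ports (as in the Python module)
def holidaysA : List String :=
  ["1/1", "1/28", "2/14", "5/30", "7/4", "9/5", "10/10", "11/11", "11/24", "12/25"]

-- ===== PORT A =====
-- inner 'for holiday in holidays: if holiday in str: curr = 1; break'
def lookA : List String → String → Int
  | [], _ => 0
  | h :: hs, s => if PySem.Str.isIn h s then 1 else lookA hs s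

def isHoliday (strs : List String) : List Int :=
  strs.foldl (fun res s => res ++ [lookA holidaysA s]) []

-- ===== PORT B =====
-- _hasHoliday: for i,c in enumerate(s): if c=='/': for (l,r) in the three windows:
--   if l >= 0 and s[l:r] in _H: return True
def hasHolidayB (cs : List Char) : Bool :=
  (PySem.List.enumerate cs).any (fun ic =>
    ic.2 == '/' &&
      ([(ic.1 - 1, ic.1 + 2), (ic.1 - 1, ic.1 + 3), (ic.1 - 2, ic.1 + 3)] : List (Int × Int)).any
        (fun lr =>
          decide (0 ≤ lr.1) &&
            holidaysA.any (fun h => PySem.List.slice cs (some lr.1) (some lr.2) == h.toList)))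

def isHoliday_alt (strs : List String) : List Int :=
  strs.map (fun s => if hasHolidayB s.toList then 1 else 0)

-- ===== PRECONDITION & SPEC =====
def Spec_isHoliday (strs : List String) (out : List Int) : Prop := out = isHoliday_alt strs
instance (strs : List String) (out : List Int) : Decidable (Spec_isHoliday strs out) := by unfold Spec_isHoliday; infer_instance

-- ===== CLAIM (what is proved, stated in full; the proofs are below) =====
def Claim_equal_isHoliday : Prop := ∀ (strs : List String), Dom_isHoliday strs → Spec_isHoliday strs (isHoliday strs)

-- ===== LEMMAS AND PROOFS =====

theorem lookA_eq_any (hs : List String) (s : String) :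
    lookA hs s = if hs.any (fun h => PySem.Str.isIn h s) then 1 else 0 := by
  induction hs with
  | nil => rfl
  | cons h t ih =>
    simp only [lookA, List.any_cons, ih, Bool.or_eq_true]
    split_ifs <;> tauto

-- (↑(s + i), cs[i]) is an element of enumerate cs s
theorem mem_enumerate_getElem (cs : List Char) (st : Int) (i : Nat) (hi : i < cs.length) :
    ((st + i, cs[i]) : Int × Char) ∈ PySem.List.enumerate cs st := by
  induction cs generalizing st i with
  | nil => simp at hi
  | cons c t ih =>
    rw [PySem.List.enumerate_cons]
    cases i with
    | zero => simp
    | succ k =>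
      right
      have := ih (st + 1) k (by simpa using hi)
      simpa [add_comm, add_left_comm, add_assoc] using this

theorem fst_enumerate_nonneg (cs : List Char) (p : Int × Char)
    (hp : p ∈ PySem.List.enumerate cs 0) : 0 ≤ p.1 := by
  have : p.1 ∈ (PySem.List.enumerate cs 0).map (·.1) := List.mem_map_of_mem hp
  rw [PySem.List.map_fst_enumerate] at this
  exact (PySem.List.mem_pyRange_one.mp this).1

-- an occurrence of holiday h at position j, with '/' at offset p in h, makes hasHolidayB fire
theorem hit_of_occ (cs : List Char) (h : String) (j p : Nat)
    (hmem : h ∈ holidaysA)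
    (hp : p < h.toList.length)
    (hc : h.toList[p] = '/')
    (hpair : (((j : Int), (j : Int) + h.toList.length) : Int × Int) ∈
      ([((j + p : Int) - 1, (j + p : Int) + 2), ((j + p : Int) - 1, (j + p : Int) + 3),
        ((j + p : Int) - 2, (j + p : Int) + 3)] : List (Int × Int)))
    (hpre : h.toList <+: cs.drop j) :
    hasHolidayB cs = true := by
  have hlen : h.toList.length ≤ cs.length - j := by
    have := hpre.length_le
    simpa [List.length_drop] using this
  have hjp : j + p < cs.length := by omega
  rw [hasHolidayB, List.any_eq_true]
  refine ⟨((j + p : Int), cs[j + p]), ?_, ?_⟩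
  · have := mem_enumerate_getElem cs 0 (j + p) hjp
    simpa using this
  · have hslash : cs[j + p] = '/' := by
      have h1 : (cs.drop j)[p]'(by simp; omega) = cs[j + p] := by
        simp [List.getElem_drop]
      have h2 : h.toList[p] = (cs.drop j)[p]'(by simp; omega) := hpre.getElem hp
      rw [← h1, ← h2, hc]
    have h0j : (0 : Int) ≤ (j : Int) := Int.natCast_nonneg j
    have hslice : PySem.List.slice cs (some (j : Int)) (some ((j : Int) + h.toList.length))
        = List.take h.toList.length (List.drop j cs) := by
      rw [PySem.List.slice_toNat cs h0j (by positivity)]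
      have ht : ((j : Int) + h.toList.length).toNat - ((j : Int)).toNat = h.toList.length := by
        omega
      rw [ht, Int.toNat_natCast]
    simp only [Bool.and_eq_true, beq_iff_eq, List.any_eq_true, decide_eq_true_eq]
    refine ⟨hslash, ((j : Int), (j : Int) + h.toList.length), hpair, h0j, h, hmem, ?_⟩
    exact hslice.trans (List.prefix_iff_eq_take.mp hpre).symm

theorem anyIn_of_hit (cs : List Char) (hhit : hasHolidayB cs = true) :
    holidaysA.any (fun h => PySem.Chars.isIn h.toList cs) = true := by
  rw [hasHolidayB, List.any_eq_true] at hhit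
  obtain ⟨ic, hicmem, hprop⟩ := hhit
  simp only [Bool.and_eq_true, List.any_eq_true, decide_eq_true_eq, beq_iff_eq] at hprop
  obtain ⟨-, lr, hlrmem, hl0, h, hhmem, hslice⟩ := hprop
  have hi0 : 0 ≤ ic.1 := fst_enumerate_nonneg cs ic hicmem
  have hr0 : 0 ≤ lr.2 := by
    simp only [List.mem_cons, List.not_mem_nil, or_false] at hlrmem
    rcases hlrmem with h' | h' | h' <;> (rw [h']; simp; omega)
  rw [PySem.List.slice_toNat cs hl0 hr0] at hslice
  have hpre : h.toList <+: cs.drop lr.1.toNat := by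
    rw [← hslice]; exact List.take_prefix _ _
  rw [List.any_eq_true]
  refine ⟨h, hhmem, ?_⟩
  exact (PySem.Chars.exists_prefix_drop_iff_isIn h.toList cs).mp ⟨lr.1.toNat, hpre⟩

theorem hit_of_anyIn (cs : List Char)
    (hany : holidaysA.any (fun h => PySem.Chars.isIn h.toList cs) = true) :
    hasHolidayB cs = true := by
  rw [List.any_eq_true] at hany
  obtain ⟨h, hmem, hin⟩ := hany
  obtain ⟨j, hpre⟩ := (PySem.Chars.exists_prefix_drop_iff_isIn h.toList cs).mpr hin
  simp only [holidaysA, List.mem_cons, List.not_mem_nil, or_false] at hmem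
  rcases hmem with rfl|rfl|rfl|rfl|rfl|rfl|rfl|rfl|rfl|rfl
  -- slash at offset 1 (lengths 3 or 4), or offset 2 (length 5)
  case _ => exact hit_of_occ cs _ j 1 (by decide) (by decide) (by decide) (by simp; omega) hpre
  case _ => exact hit_of_occ cs _ j 1 (by decide) (by decide) (by decide) (by simp; omega) hpre
  case _ => exact hit_of_occ cs _ j 1 (by decide) (by decide) (by decide) (by simp; omega) hpre
  case _ => exact hit_of_occ cs _ j 1 (by decide) (by decide) (by decide) (by simp; omega) hpre
  case _ => exact hit_of_occ cs _ j 1 (by decide) (by decide) (by decide) (by simp; omega) hpre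
  case _ => exact hit_of_occ cs _ j 1 (by decide) (by decide) (by decide) (by simp; omega) hpre
  case _ => exact hit_of_occ cs _ j 2 (by decide) (by decide) (by decide) (by simp; omega) hpre
  case _ => exact hit_of_occ cs _ j 2 (by decide) (by decide) (by decide) (by simp; omega) hpre
  case _ => exact hit_of_occ cs _ j 2 (by decide) (by decide) (by decide) (by simp; omega) hpre
  case _ => exact hit_of_occ cs _ j 2 (by decide) (by decide) (by decide) (by simp; omega) hpre

theorem elem_eq (s : String) :
    lookA holidaysA s = if hasHolidayB s.toList then 1 else 0 := by
  rw [lookA_eq_any]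
  have hfun : (fun h : String => PySem.Str.isIn h s)
      = (fun h : String => PySem.Chars.isIn h.toList s.toList) := by
    funext h; simp [PySem.Str.isIn_eq]
  rw [hfun]
  by_cases hh : hasHolidayB s.toList = true
  · rw [hh, anyIn_of_hit s.toList hh]
  · rw [Bool.not_eq_true] at hh
    rw [hh]
    rcases hA : holidaysA.any (fun h => PySem.Chars.isIn h.toList s.toList) with _ | _
    · rfl
    · exact absurd (hit_of_anyIn s.toList hA) (by simp [hh])

-- ===== VERDICT (by name: the statement is the Claim_ definition above) =====
theorem isHoliday_spec : Claim_equal_isHoliday := by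
  intro strs _
  unfold Spec_isHoliday isHoliday isHoliday_alt
  rw [PySem.List.foldl_append_singleton_eq_map]
  exact List.map_congr_left (fun s _ => elem_eq s)
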